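-- pv_equiv track=rewrite | github.com/kittytastic/Y4-CW-Networks-PT2 | Code/Q1.py | unmerge_nodes
-- ===== SOURCE A (Python) =====
-- from typing import Iterable, List, Tuple, Set, Dict, Union
--
-- def unmerge_nodes(nodes:Iterable[int], merged_nodes: List[Set[int]])->Set[int]:
--     out_set:Set[int] = set()
--
--     for n in nodes:
--         out_set.add(n)
--
--         for s in merged_nodes:
--             if n in s:
--                 out_set = out_set.union(s)
--
--     return out_set
-- ===== SOURCE B (Python) =====
-- def unmerge_nodes(nodes, merged_nodes):
--     # Build an inverted index element -> list of merged sets containing it (one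
--     # pass over merged_nodes), so the per-node scan of all merged sets disappears.
--     containing = {}
--     for s in merged_nodes:
--         for x in s:
--             containing.setdefault(x, []).append(s)
--     out = set()
--     for n in nodes:
--         out.add(n)
--         for s in containing.get(n, []):
--             out |= s
--     return out
-- ===== Notes on version B (the rewrite author's own statement) =====
-- stated objective: faster
-- what changed: A scans every merged set for every node; B builds an inverted index (element -> list of merged sets containing it) in one preprocessing pass over merged_nodes, so each node's containing sets are found by a dict lookup instead of an inner scan.
import Mathlib
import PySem

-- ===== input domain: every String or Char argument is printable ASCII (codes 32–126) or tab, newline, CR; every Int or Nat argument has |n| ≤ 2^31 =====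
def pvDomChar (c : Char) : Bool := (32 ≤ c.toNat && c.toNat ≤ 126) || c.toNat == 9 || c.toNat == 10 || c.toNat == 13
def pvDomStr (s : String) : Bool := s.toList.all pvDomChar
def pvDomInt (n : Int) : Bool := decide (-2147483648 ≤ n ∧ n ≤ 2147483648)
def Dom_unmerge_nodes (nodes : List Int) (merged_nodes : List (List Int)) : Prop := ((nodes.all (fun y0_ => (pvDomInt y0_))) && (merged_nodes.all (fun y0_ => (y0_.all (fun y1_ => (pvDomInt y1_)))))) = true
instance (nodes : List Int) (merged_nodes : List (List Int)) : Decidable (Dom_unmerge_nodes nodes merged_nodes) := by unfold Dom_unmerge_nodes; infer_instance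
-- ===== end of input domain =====

-- B replaces A's per-node scan of every merged set by an inverted index
-- element -> containing merged sets, built in one pass (objective: faster).


-- ===== PORT A =====
def unmerge_nodes (nodes : List Int) (merged_nodes : List (List Int)) : List Int :=
  nodes.foldl (fun out_set n =>
    merged_nodes.foldl (fun out_set s =>
      if s.contains n then PySem.Set.union out_set s else out_set)
      (PySem.Set.add out_set n))
    PySem.Set.empty

-- ===== PORT B =====
-- Source B's index-building pass: for s in merged_nodes: for x in s: containing.setdefault(x, []).append(s)
-- (s is a Python set, so 'for x in s' visits its distinct elements: PySem.Set.ofList s;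
-- each x is only used as a dict key, so set iteration order does not affect the result).
def pvContaining (merged_nodes : List (List Int)) : PySem.Dict Int (List (List Int)) :=
  merged_nodes.foldl (fun d s =>
    (PySem.Set.ofList s).foldl (fun d x => d.modify x [] (· ++ [s])) d)
    PySem.Dict.empty

def unmerge_nodes_alt (nodes : List Int) (merged_nodes : List (List Int)) : List Int :=
  let containing := pvContaining merged_nodes
  nodes.foldl (fun out n =>
    (containing.getD n []).foldl PySem.Set.union (PySem.Set.add out n))
    PySem.Set.empty

-- ===== PRECONDITION & SPEC =====
def Spec_unmerge_nodes (nodes : List Int) (merged_nodes : List (List Int)) (out : List Int) : Prop := out = unmerge_nodes_alt nodes merged_nodes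
instance (nodes : List Int) (merged_nodes : List (List Int)) (out : List Int) : Decidable (Spec_unmerge_nodes nodes merged_nodes out) := by unfold Spec_unmerge_nodes; infer_instance

-- ===== CLAIM (what is proved, stated in full; the proofs are below) =====
def Claim_equal_unmerge_nodes : Prop := ∀ (nodes : List Int) (merged_nodes : List (List Int)), Dom_unmerge_nodes nodes merged_nodes → Spec_unmerge_nodes nodes merged_nodes (unmerge_nodes nodes merged_nodes)

-- ===== LEMMAS AND PROOFS =====

-- a nested fold over a per-element expansion is a fold over the flattened list
theorem foldl_flatMap_eq {α β γ : Type} (l : List α) (F : α → List β) (f : γ → β → γ) (d : γ) :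
    (l.flatMap F).foldl f d = l.foldl (fun d s => (F s).foldl f d) d := by
  induction l generalizing d with
  | nil => rfl
  | cons s rest ih => simp only [List.flatMap_cons, List.foldl_append, List.foldl_cons, ih]

-- per merged set: its contribution to the index entry at n
theorem head_part (n : Int) (s : List Int) :
    ((((PySem.Set.ofList s).map (fun x => (x, s))).filter (fun p => p.1 == n)).map (fun p => p.2))
    = if s.contains n then [s] else [] := by
  rw [List.filter_map]
  have hcomp : ((fun p : Int × List Int => p.1 == n) ∘ fun x => (x, s)) = fun x => x == n := rfl
  rw [hcomp]
  by_cases h : s.contains n = true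
  · have hm : n ∈ PySem.Set.ofList s := by rw [PySem.Set.mem_ofList]; simpa using h
    have hnd : (PySem.Set.ofList s).Nodup := PySem.Set.nodup_ofList s
    rw [List.filter_beq, List.count_eq_one_of_mem hnd hm, List.replicate_one, if_pos h]
    rfl
  · have hm : n ∉ PySem.Set.ofList s := by rw [PySem.Set.mem_ofList]; simpa using h
    have hf : (PySem.Set.ofList s).filter (fun x => x == n) = [] := by
      rw [List.filter_eq_nil_iff]
      intro x hx hxe
      exact hm (by rwa [← (beq_iff_eq).mp hxe])
    rw [hf, if_neg h]
    rfl

-- the index's entry at n is exactly the merged sets containing n, in order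
theorem getD_pvContaining (merged : List (List Int)) (n : Int) :
    (pvContaining merged).getD n [] = merged.filter (fun s => s.contains n) := by
  have h1 : pvContaining merged
      = (merged.flatMap (fun s => (PySem.Set.ofList s).map (fun x => (x, s)))).foldl
          (fun d p => d.modify p.1 [] (· ++ [p.2])) PySem.Dict.empty := by
    rw [foldl_flatMap_eq]
    simp only [List.foldl_map]
    rfl
  rw [h1, PySem.Dict.getD_foldl_modify_append, PySem.Dict.getD_empty]
  rw [List.nil_append]
  clear h1
  induction merged with
  | nil => rfl
  | cons s rest ih =>
    rw [List.flatMap_cons, List.filter_append, List.map_append, head_part, ih,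
      List.filter_cons]
    by_cases h : s.contains n = true
    · rw [if_pos h, if_pos h]; rfl
    · rw [if_neg h, if_neg h]; rfl

-- A's inner scan with a containment guard is a fold of union over the filtered list
theorem inner_eq_filter (n : Int) (merged : List (List Int)) (acc : List Int) :
    merged.foldl (fun out_set s =>
      if s.contains n then PySem.Set.union out_set s else out_set) acc
    = (merged.filter (fun s => s.contains n)).foldl PySem.Set.union acc := by
  induction merged generalizing acc with
  | nil => rfl
  | cons s rest ih =>
    rw [List.foldl_cons, List.filter_cons]
    by_cases h : s.contains n = true
    · rw [if_pos h, if_pos h, List.foldl_cons, ih]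
    · rw [if_neg h, if_neg h, ih]

-- ===== VERDICT (by name: the statement is the Claim_ definition above) =====
theorem unmerge_nodes_spec : Claim_equal_unmerge_nodes := by
  intro nodes merged_nodes _
  show unmerge_nodes nodes merged_nodes = unmerge_nodes_alt nodes merged_nodes
  unfold unmerge_nodes unmerge_nodes_alt
  simp only [inner_eq_filter, getD_pvContaining]
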